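-- pv_equiv track=rewrite | github.com/ericka-cespedes/IntroProgrammingPY | Practica7.py | serieAux
-- ===== SOURCE A (Python) =====
-- def serieAux(n, i, num, res):
--     if n==num:
--         return res + [num]
--     else:
--         if i%2==0:
--             return serieAux(n, i+1, num+2, res+[num])
--         else:
--             return serieAux(n, i+1, num+3, res+[num])
-- ===== SOURCE B (Python) =====
-- def serieAux(n, i, num, res):
--     # closed form: the series adds 2,3,2,3,... (or 3,2,... if i is odd); offsets are
--     # periodic with period 5 over two steps, so build the whole list in one comprehension.
--     d = n - num
--     q, r = divmod(d, 5)
--     k = 2 * q + (1 if r != 0 else 0)  # number of steps until num reaches n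
--     b = 2 if i % 2 == 0 else 3
--     return res + [num + 5 * (j // 2) + (b if j % 2 != 0 else 0) for j in range(k + 1)]
-- ===== Notes on version B (the rewrite author's own statement) =====
-- stated objective: alternative
-- what changed: Replaces A's recursion (which copies res+[num] at every step) with a closed-form list comprehension: the number of steps and each element's offset are computed arithmetically from d = n - num (the +2/+3 pattern is periodic with period 5 over two steps), building the list in one pass.
import Mathlib
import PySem

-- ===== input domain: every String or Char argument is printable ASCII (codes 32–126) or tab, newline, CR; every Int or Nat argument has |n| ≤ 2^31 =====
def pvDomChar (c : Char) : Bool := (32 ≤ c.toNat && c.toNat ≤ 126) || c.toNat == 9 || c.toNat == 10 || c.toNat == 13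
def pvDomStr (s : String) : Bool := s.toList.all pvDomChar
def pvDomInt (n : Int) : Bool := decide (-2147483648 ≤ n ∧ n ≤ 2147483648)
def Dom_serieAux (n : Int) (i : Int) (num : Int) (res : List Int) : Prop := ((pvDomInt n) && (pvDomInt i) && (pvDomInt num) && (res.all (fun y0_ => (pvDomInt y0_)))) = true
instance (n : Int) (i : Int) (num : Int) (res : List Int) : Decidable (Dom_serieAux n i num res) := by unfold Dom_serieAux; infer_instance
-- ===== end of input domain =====

-- B replaces A's recursion by a closed-form comprehension built from d = n - num in one pass
-- (A copies res+[num] at every recursive step); equivalence is proved on Pre_, where A terminates.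

-- ===== PORT A =====
-- Literal port of A's recursion; termination measure (n - num).toNat. The final 'else'
-- branch is a totality guard only: there the Python recurses forever (excluded by Pre_).
def serieAux (n : Int) (i : Int) (num : Int) (res : List Int) : List Int :=
  if n = num then res ++ [num]
  else if _h : num < n then
    (if i % 2 = 0 then serieAux n (i + 1) (num + 2) (res ++ [num])
     else serieAux n (i + 1) (num + 3) (res ++ [num]))
  else res ++ [num]
termination_by (n - num).toNat
decreasing_by all_goals omega

-- ===== PORT B =====
def serieAux_alt (n : Int) (i : Int) (num : Int) (res : List Int) : List Int :=
  let d := n - num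
  let q := PySem.Int.floordiv d 5
  let r := PySem.Int.mod d 5
  let k := 2 * q + (if r ≠ 0 then (1 : Int) else 0)
  let b := if i % 2 = 0 then (2 : Int) else 3
  res ++ (PySem.List.pyRange 0 (k + 1) 1).map
    (fun j => num + 5 * PySem.Int.floordiv j 2 + (if PySem.Int.mod j 2 ≠ 0 then b else 0))

-- ===== PRECONDITION & SPEC =====
-- Pre_ excludes exactly the inputs where Python A never returns (infinite recursion /
-- RecursionError): num must reach n by the alternating +2/+3 steps starting at parity i.
def Pre_serieAux (n : Int) (i : Int) (num : Int) (res : List Int) : Prop :=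
  0 ≤ n - num ∧
    (if i % 2 = 0 then (n - num) % 5 = 0 ∨ (n - num) % 5 = 2
     else (n - num) % 5 = 0 ∨ (n - num) % 5 = 3)
instance (n : Int) (i : Int) (num : Int) (res : List Int) : Decidable (Pre_serieAux n i num res) := by
  unfold Pre_serieAux; infer_instance

def pvWitness_serieAux : Int × Int × Int × List Int := (7, 0, 0, [1])

def Spec_serieAux (n : Int) (i : Int) (num : Int) (res : List Int) (out : List Int) : Prop := out = serieAux_alt n i num res
instance (n : Int) (i : Int) (num : Int) (res : List Int) (out : List Int) : Decidable (Spec_serieAux n i num res out) := by unfold Spec_serieAux; infer_instance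

-- ===== CLAIM (what is proved, stated in full; the proofs are below) =====
def Claim_equal_serieAux : Prop := ∀ (n : Int) (i : Int) (num : Int) (res : List Int), Dom_serieAux n i num res → Pre_serieAux n i num res → Spec_serieAux n i num res (serieAux n i num res)

-- ===== LEMMAS AND PROOFS =====

-- Proof-side normal form of B's comprehension, over a Nat-length range.
def altN (b : Int) (num : Int) (K : Nat) (res : List Int) : List Int :=
  res ++ (List.range K).map (fun j => num + 5 * ((j / 2 : Nat) : Int) + (if j % 2 = 1 then b else 0))

lemma alt_bridge (n i num : Int) (res : List Int) :
    serieAux_alt n i num res =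
      altN (if i % 2 = 0 then 2 else 3) num
        ((2 * PySem.Int.floordiv (n - num) 5 + (if PySem.Int.mod (n - num) 5 ≠ 0 then (1 : Int) else 0) + 1).toNat)
        res := by
  unfold serieAux_alt altN
  dsimp only []
  rw [PySem.List.pyRange_one]
  simp only [List.map_map, sub_zero]
  congr 1
  apply List.map_congr_left
  intro j _
  simp [Function.comp, PySem.Int.floordiv_natCast, PySem.Int.mod_natCast]
  rcases Nat.mod_two_eq_zero_or_one j with h | h <;> simp [h]
  all_goals (intro hc; exfalso; omega)

lemma altN_step (b num : Int) (K : Nat) (res : List Int) :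
    altN b num (K + 1) res = altN (5 - b) (num + b) K (res ++ [num]) := by
  unfold altN
  rw [List.range_succ_eq_map]
  simp only [List.map_cons, List.map_map, List.append_assoc]
  have h0 : num + 5 * ((0 / 2 : Nat) : Int) + (if (0 : Nat) % 2 = 1 then b else 0) = num := by
    norm_num
  rw [h0]
  congr 1
  simp only [List.singleton_append, List.cons.injEq, true_and]
  apply List.map_congr_left
  intro j _
  simp only [Function.comp]
  rcases Nat.mod_two_eq_zero_or_one j with h | h
  · have h1 : (j + 1) % 2 = 1 := by omega
    have h2 : (j + 1) / 2 = j / 2 := by omega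
    simp [h, h1, h2]; ring
  · have h1 : (j + 1) % 2 = 0 := by omega
    have h2 : (j + 1) / 2 = j / 2 + 1 := by omega
    simp [h, h1, h2]
    push_cast
    ring

lemma fd5 (d : Int) : PySem.Int.floordiv d 5 = d / 5 :=
  PySem.Int.floordiv_eq_ediv_of_pos (by norm_num)
lemma md5 (d : Int) : PySem.Int.mod d 5 = d % 5 :=
  PySem.Int.mod_eq_emod_of_pos (by norm_num)

lemma main_eq : ∀ (D : Nat) (n i num : Int) (res : List Int), (n - num).toNat = D →
    Pre_serieAux n i num res → serieAux n i num res = serieAux_alt n i num res := by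
  intro D
  induction D using Nat.strong_induction_on with
  | _ D IH =>
    intro n i num res hD hpre
    obtain ⟨hd0, hmod⟩ := hpre
    rw [serieAux]
    by_cases heq : n = num
    · subst heq
      rw [alt_bridge]
      simp only [fd5, md5, sub_self]
      norm_num
      unfold altN
      simp [List.range_succ]
    · have hlt : num < n := by omega
      have hne2 : n - num ≠ 0 := by omega
      -- the step increment c and new parity
      by_cases hi : i % 2 = 0
      · rw [if_neg heq, dif_pos hlt, if_pos hi]
        have hm : (n - num) % 5 = 0 ∨ (n - num) % 5 = 2 := by simpa [hi] using hmod
        have hd2 : 2 ≤ n - num := by omega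
        have hpre' : Pre_serieAux n (i + 1) (num + 2) (res ++ [num]) := by
          refine ⟨by omega, ?_⟩
          have hi1 : (i + 1) % 2 = 1 := by omega
          simp only [hi1]
          norm_num
          omega
        have hrec := IH (n - (num + 2)).toNat (by omega) n (i + 1) (num + 2) (res ++ [num]) rfl hpre'
        rw [hrec, alt_bridge, alt_bridge]
        simp only [fd5, md5]
        have hi1 : (i + 1) % 2 = 1 := by omega
        have hb : (if i % 2 = 0 then (2:Int) else 3) = 2 := by simp [hi]
        have hb' : (if (i + 1) % 2 = 0 then (2:Int) else 3) = 3 := by simp [hi1]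
        rw [hb, hb']
        have hK : (2 * ((n - num) / 5) + (if (n - num) % 5 ≠ 0 then (1:Int) else 0) + 1).toNat
            = (2 * ((n - (num + 2)) / 5) + (if (n - (num + 2)) % 5 ≠ 0 then (1:Int) else 0) + 1).toNat + 1 := by
          rcases hm with h | h
          · have : (n - (num + 2)) % 5 = 3 := by omega
            simp [h, this]; omega
          · have : (n - (num + 2)) % 5 = 0 := by omega
            simp [h, this]; omega
        rw [hK, altN_step]
        norm_num
      · have hi1 : i % 2 = 1 := by omega
        rw [if_neg heq, dif_pos hlt, if_neg hi]
        have hm : (n - num) % 5 = 0 ∨ (n - num) % 5 = 3 := by simpa [hi] using hmod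
        have hd3 : 3 ≤ n - num := by omega
        have hpre' : Pre_serieAux n (i + 1) (num + 3) (res ++ [num]) := by
          refine ⟨by omega, ?_⟩
          have hi2 : (i + 1) % 2 = 0 := by omega
          simp only [hi2]
          norm_num
          omega
        have hrec := IH (n - (num + 3)).toNat (by omega) n (i + 1) (num + 3) (res ++ [num]) rfl hpre'
        rw [hrec, alt_bridge, alt_bridge]
        simp only [fd5, md5]
        have hi2 : (i + 1) % 2 = 0 := by omega
        have hb : (if i % 2 = 0 then (2:Int) else 3) = 3 := by simp [hi]
        have hb' : (if (i + 1) % 2 = 0 then (2:Int) else 3) = 2 := by simp [hi2]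
        rw [hb, hb']
        have hK : (2 * ((n - num) / 5) + (if (n - num) % 5 ≠ 0 then (1:Int) else 0) + 1).toNat
            = (2 * ((n - (num + 3)) / 5) + (if (n - (num + 3)) % 5 ≠ 0 then (1:Int) else 0) + 1).toNat + 1 := by
          rcases hm with h | h
          · have : (n - (num + 3)) % 5 = 2 := by omega
            simp [h, this]; omega
          · have : (n - (num + 3)) % 5 = 0 := by omega
            simp [h, this]; omega
        rw [hK, altN_step]
        norm_num

-- ===== VERDICT (by name: the statement is the Claim_ definition above) =====
theorem serieAux_spec : Claim_equal_serieAux := by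
  intro n i num res _hdom hpre
  unfold Spec_serieAux
  exact main_eq (n - num).toNat n i num res rfl hpre
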